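-- pv_equiv track=rewrite | github.com/ribalda/adventofcode | 2025/5/step1_2.py | part1
-- ===== SOURCE A (Python) =====
-- def part1(ranges, products):
--     out = 0
--     for p in products:
--         for a, b in ranges:
--             if p >= a and p <= b:
--                 out += 1
--                 break
--     return out
-- ===== SOURCE B (Python) =====
-- def part1(ranges, products):
--     # Merge the ranges (sorted by start) into disjoint intervals once,
--     # then binary-search each product: O((R+P) log R) instead of O(P*R).
--     merged = []
--     cur = None
--     for a, b in sorted(ranges, key=lambda r: r[0]):
--         if cur is None:
--             cur = (a, b)
--         elif a <= cur[1]: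
--             cur = (cur[0], max(cur[1], b))
--         else:
--             merged.append(cur)
--             cur = (a, b)
--     if cur is not None:
--         merged.append(cur)
--     out = 0
--     for p in products:
--         lo, hi = 0, len(merged)
--         while lo < hi:  # rightmost merged interval whose start is <= p
--             mid = (lo + hi) // 2
--             if merged[mid][0] <= p:
--                 lo = mid + 1
--             else:
--                 hi = mid
--         if lo and p <= merged[lo - 1][1]:
--             out += 1
--     return out
-- ===== Notes on version B (the rewrite author's own statement) =====
-- stated objective: faster
-- what changed: Instead of scanning every range for every product, B sorts the ranges once, merges them into disjoint intervals, and binary-searches each product in the merged list.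
import Mathlib
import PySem

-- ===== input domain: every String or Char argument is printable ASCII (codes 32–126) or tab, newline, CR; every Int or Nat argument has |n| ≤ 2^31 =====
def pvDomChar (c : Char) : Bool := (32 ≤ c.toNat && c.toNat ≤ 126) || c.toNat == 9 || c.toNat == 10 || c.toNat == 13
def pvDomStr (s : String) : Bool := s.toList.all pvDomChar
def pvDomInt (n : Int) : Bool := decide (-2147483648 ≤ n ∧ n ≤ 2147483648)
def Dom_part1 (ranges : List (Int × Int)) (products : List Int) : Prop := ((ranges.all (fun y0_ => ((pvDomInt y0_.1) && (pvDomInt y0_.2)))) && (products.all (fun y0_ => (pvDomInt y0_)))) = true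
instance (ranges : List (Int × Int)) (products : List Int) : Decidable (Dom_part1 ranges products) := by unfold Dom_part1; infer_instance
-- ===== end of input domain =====

-- B replaces A's per-product scan of all ranges by a one-off sort+merge of the
-- ranges and a binary search per product (asymptotically faster; return value identical).

-- ===== PORT A =====
-- inner 'for a, b in ranges: if p >= a and p <= b: out += 1; break'
def part1Inner (p : Int) : List (Int × Int) → Int
  | [] => 0
  | (a, b) :: rest => if p ≥ a ∧ p ≤ b then 1 else part1Inner p rest

def part1 (ranges : List (Int × Int)) (products : List Int) : Int :=
  products.foldl (fun out p => out + part1Inner p ranges) 0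

-- ===== PORT B =====
-- the 'for a, b in sorted(...)' merge loop: state = (merged, cur)
def mergeStep (st : List (Int × Int) × Option (Int × Int)) (r : Int × Int) :
    List (Int × Int) × Option (Int × Int) :=
  match st.2 with
  | none => (st.1, some r)
  | some (c, d) =>
      if r.1 ≤ d then (st.1, some (c, max d r.2))
      else (st.1 ++ [(c, d)], some r)

-- trailing 'if cur is not None: merged.append(cur)'
def flushCur (st : List (Int × Int) × Option (Int × Int)) : List (Int × Int) :=
  match st.2 with
  | none => st.1
  | some cur => st.1 ++ [cur]

def mergedOf (ranges : List (Int × Int)) : List (Int × Int) :=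
  flushCur ((PySem.List.sorted ranges (fun r => r.1) false).foldl mergeStep ([], none))

-- the 'while lo < hi' binary-search loop (fuel = hi - lo at the call site is a
-- totality guard only: it never runs out while lo < hi)
def bsearch (m : List (Int × Int)) (p : Int) : Nat → Nat → Nat → Nat
  | 0, lo, _ => lo
  | fuel + 1, lo, hi =>
    if lo < hi then
      if (m.getD ((lo + hi) / 2) (0, 0)).1 ≤ p then bsearch m p fuel ((lo + hi) / 2 + 1) hi
      else bsearch m p fuel lo ((lo + hi) / 2)
    else lo

def part1_alt (ranges : List (Int × Int)) (products : List Int) : Int :=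
  let m := mergedOf ranges
  products.foldl (fun out p =>
    let i := bsearch m p m.length 0 m.length
    if i ≠ 0 ∧ p ≤ (m.getD (i - 1) (0, 0)).2 then out + 1 else out) 0

-- ===== PRECONDITION & SPEC =====
def Spec_part1 (ranges : List (Int × Int)) (products : List Int) (out : Int) : Prop := out = part1_alt ranges products
instance (ranges : List (Int × Int)) (products : List Int) (out : Int) : Decidable (Spec_part1 ranges products out) := by unfold Spec_part1; infer_instance

-- ===== CLAIM (what is proved, stated in full; the proofs are below) =====
def Claim_equal_part1 : Prop := ∀ (ranges : List (Int × Int)) (products : List Int), Dom_part1 ranges products → Spec_part1 ranges products (part1 ranges products)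

-- ===== LEMMAS AND PROOFS =====

-- "p is covered by some range in xs"
abbrev covers (p : Int) (xs : List (Int × Int)) : Prop := ∃ r ∈ xs, r.1 ≤ p ∧ p ≤ r.2

theorem part1Inner_eq (p : Int) (xs : List (Int × Int)) :
    part1Inner p xs = if covers p xs then 1 else 0 := by
  induction xs with
  | nil => simp [part1Inner, covers]
  | cons r rest ih =>
      obtain ⟨a, b⟩ := r
      simp only [part1Inner, ih, ge_iff_le]
      by_cases h : a ≤ p ∧ p ≤ b
      · rw [if_pos h,
          if_pos (show covers p ((a, b) :: rest) from ⟨(a, b), List.mem_cons_self, h⟩)]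
      · rw [if_neg h]
        have hiff : covers p ((a, b) :: rest) ↔ covers p rest := by
          constructor
          · rintro ⟨r, hmem, hp⟩
            rcases List.mem_cons.mp hmem with rfl | hr
            · exact absurd hp h
            · exact ⟨r, hr, hp⟩
          · rintro ⟨r, hr, hp⟩
            exact ⟨r, List.mem_cons_of_mem _ hr, hp⟩
        simp only [hiff]

-- recursive view of the merge loop
def mergeRec (c d : Int) : List (Int × Int) → List (Int × Int)
  | [] => [(c, d)]
  | (a, b) :: rest => if a ≤ d then mergeRec c (max d b) rest else (c, d) :: mergeRec a b rest

theorem foldl_mergeStep_some (xs : List (Int × Int)) :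
    ∀ (done : List (Int × Int)) (c d : Int),
      flushCur (xs.foldl mergeStep (done, some (c, d))) = done ++ mergeRec c d xs := by
  induction xs with
  | nil => intro done c d; simp [flushCur, mergeRec]
  | cons r rest ih =>
      intro done c d
      obtain ⟨a, b⟩ := r
      simp only [List.foldl_cons, mergeStep, mergeRec]
      by_cases h : a ≤ d
      · simp only [if_pos h]; exact ih done c (max d b)
      · simp only [if_neg h]
        rw [ih (done ++ [(c, d)]) a b, List.append_assoc, List.singleton_append]

theorem mergedOf_eq (ranges : List (Int × Int)) :
    mergedOf ranges =
      match PySem.List.sorted ranges (fun r => r.1) false with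
      | [] => []
      | (a, b) :: rest => mergeRec a b rest := by
  unfold mergedOf
  cases h : PySem.List.sorted ranges (fun r => r.1) false with
  | nil => simp [flushCur]
  | cons r rest =>
      obtain ⟨a, b⟩ := r
      simp only [List.foldl_cons, mergeStep]
      simpa using foldl_mergeStep_some rest [] a b

-- coverage is preserved by mergeRec (needs: c below all starts, starts nondecreasing)
theorem mergeRec_covers (p : Int) :
    ∀ (xs : List (Int × Int)) (c d : Int),
      (∀ r ∈ xs, c ≤ r.1) → xs.Pairwise (fun x y => x.1 ≤ y.1) →
      (covers p (mergeRec c d xs) ↔ ((c ≤ p ∧ p ≤ d) ∨ covers p xs)) := by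
  intro xs
  induction xs with
  | nil => intro c d _ _; simp [mergeRec, covers]
  | cons r rest ih =>
      intro c d hlo hpw
      obtain ⟨a, b⟩ := r
      have hca : c ≤ a := hlo (a, b) List.mem_cons_self
      have hlo' : ∀ r ∈ rest, a ≤ r.1 := fun r hr => (List.pairwise_cons.mp hpw).1 r hr
      have hpw' := (List.pairwise_cons.mp hpw).2
      simp only [mergeRec]
      by_cases h : a ≤ d
      · rw [if_pos h]
        rw [ih c (max d b) (fun r hr => le_trans hca (hlo' r hr)) hpw']
        constructor
        · rintro (⟨h1, h2⟩ | hc)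
          · by_cases hd : p ≤ d
            · exact Or.inl ⟨h1, hd⟩
            · refine Or.inr ⟨(a, b), List.mem_cons_self, le_trans h ((not_le.mp hd).le), ?_⟩
              rcases le_max_iff.mp h2 with hx | hx
              · exact absurd hx hd
              · exact hx
          · exact Or.inr ⟨hc.choose, List.mem_cons_of_mem _ hc.choose_spec.1, hc.choose_spec.2⟩
        · rintro (⟨h1, h2⟩ | ⟨r', hr', h1, h2⟩)
          · exact Or.inl ⟨h1, le_trans h2 (le_max_left _ _)⟩
          · rcases List.mem_cons.mp hr' with rfl | hr''
            · exact Or.inl ⟨le_trans hca h1, le_trans h2 (le_max_right _ _)⟩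
            · exact Or.inr ⟨r', hr'', h1, h2⟩
      · rw [if_neg h]
        have hiha := ih a b hlo' hpw'
        constructor
        · rintro ⟨r', hr', h1, h2⟩
          rcases List.mem_cons.mp hr' with rfl | hr''
          · exact Or.inl ⟨h1, h2⟩
          · rcases hiha.mp ⟨r', hr'', h1, h2⟩ with ⟨ha1, ha2⟩ | hc
            · exact Or.inr ⟨(a, b), List.mem_cons_self, ha1, ha2⟩
            · exact Or.inr ⟨hc.choose, List.mem_cons_of_mem _ hc.choose_spec.1, hc.choose_spec.2⟩
        · rintro (⟨h1, h2⟩ | ⟨r', hr', h1, h2⟩)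
          · exact ⟨(c, d), List.mem_cons_self, h1, h2⟩
          · rcases List.mem_cons.mp hr' with rfl | hr''
            · have := hiha.mpr (Or.inl ⟨h1, h2⟩)
              exact ⟨this.choose, List.mem_cons_of_mem _ this.choose_spec.1, this.choose_spec.2⟩
            · have := hiha.mpr (Or.inr ⟨r', hr'', h1, h2⟩)
              exact ⟨this.choose, List.mem_cons_of_mem _ this.choose_spec.1, this.choose_spec.2⟩

-- structure of mergeRec's output: head start is c
theorem mergeRec_head (c d : Int) (xs : List (Int × Int)) :
    ∃ d' t, mergeRec c d xs = (c, d') :: t := by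
  induction xs generalizing c d with
  | nil => exact ⟨d, [], rfl⟩
  | cons r rest ih =>
      obtain ⟨a, b⟩ := r
      simp only [mergeRec]
      by_cases h : a ≤ d
      · rw [if_pos h]; exact ih c (max d b)
      · rw [if_neg h]
        obtain ⟨d', t, ht⟩ := ih a b
        exact ⟨d, (a, d') :: t, by rw [ht]⟩

-- the separation relation between merged intervals
def sep (x y : Int × Int) : Prop := x.2 < y.1 ∧ x.1 ≤ y.1

theorem mergeRec_chain (c d : Int) (xs : List (Int × Int)) (hpw : xs.Pairwise (fun x y => x.1 ≤ y.1))
    (hlo : ∀ r ∈ xs, c ≤ r.1) : (mergeRec c d xs).IsChain sep := by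
  induction xs generalizing c d with
  | nil => exact List.isChain_singleton _
  | cons r rest ih =>
      obtain ⟨a, b⟩ := r
      have hlo' : ∀ r ∈ rest, a ≤ r.1 := fun r hr => (List.pairwise_cons.mp hpw).1 r hr
      have hpw' := (List.pairwise_cons.mp hpw).2
      simp only [mergeRec]
      by_cases h : a ≤ d
      · rw [if_pos h]
        exact ih c (max d b) hpw' (fun r hr => le_trans (hlo (a, b) List.mem_cons_self) (hlo' r hr))
      · rw [if_neg h]
        obtain ⟨d', t, ht⟩ := mergeRec_head a b rest
        rw [ht]
        have := ih a b hpw' hlo'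
        rw [ht] at this
        exact List.IsChain.cons_cons ⟨not_le.mp h, hlo (a, b) List.mem_cons_self⟩ this

theorem mergedOf_pairwise (ranges : List (Int × Int)) : (mergedOf ranges).Pairwise sep := by
  rw [mergedOf_eq]
  have hpw : (PySem.List.sorted ranges (fun r => r.1) false).Pairwise (fun x y => x.1 ≤ y.1) :=
    PySem.List.sorted_pairwise ranges (fun r => r.1)
  cases h : PySem.List.sorted ranges (fun r => r.1) false with
  | nil => simp
  | cons r rest =>
      obtain ⟨a, b⟩ := r
      rw [h] at hpw
      have hchain := mergeRec_chain a b rest (List.pairwise_cons.mp hpw).2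
        (fun r hr => (List.pairwise_cons.mp hpw).1 r hr)
      haveI : Trans sep sep sep :=
        ⟨fun hxy hyz => ⟨hxy.1.trans_le hyz.2, hxy.2.trans hyz.2⟩⟩
      exact List.isChain_iff_pairwise.mp hchain

theorem mergedOf_covers (p : Int) (ranges : List (Int × Int)) :
    covers p (mergedOf ranges) ↔ covers p ranges := by
  rw [mergedOf_eq]
  have hmem : ∀ r : Int × Int, r ∈ PySem.List.sorted ranges (fun r => r.1) false ↔ r ∈ ranges :=
    fun r => PySem.List.mem_sorted ranges (fun r => r.1) false r
  have hpw : (PySem.List.sorted ranges (fun r => r.1) false).Pairwise (fun x y => x.1 ≤ y.1) :=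
    PySem.List.sorted_pairwise ranges (fun r => r.1)
  have hcov : covers p (PySem.List.sorted ranges (fun r => r.1) false) ↔ covers p ranges := by
    constructor
    · rintro ⟨r, hr, h⟩; exact ⟨r, (hmem r).mp hr, h⟩
    · rintro ⟨r, hr, h⟩; exact ⟨r, (hmem r).mpr hr, h⟩
  cases h : PySem.List.sorted ranges (fun r => r.1) false with
  | nil => rw [h] at hcov; simpa [covers] using hcov.symm
  | cons r rest =>
      obtain ⟨a, b⟩ := r
      rw [h] at hpw hcov
      rw [mergeRec_covers p rest a b (fun r hr => (List.pairwise_cons.mp hpw).1 r hr)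
        (List.pairwise_cons.mp hpw).2]
      rw [← hcov]
      constructor
      · rintro (⟨h1, h2⟩ | ⟨r', hr', hc⟩)
        · exact ⟨(a, b), List.mem_cons_self, h1, h2⟩
        · exact ⟨r', List.mem_cons_of_mem _ hr', hc⟩
      · rintro ⟨r', hr', hc⟩
        rcases List.mem_cons.mp hr' with rfl | hr''
        · exact Or.inl hc
        · exact Or.inr ⟨r', hr'', hc⟩

-- binary-search loop invariant
theorem bsearch_inv (m : List (Int × Int)) (p : Int) :
    ∀ (n lo hi : Nat), hi - lo ≤ n → lo ≤ hi → hi ≤ m.length →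
      (lo = 0 ∨ ∃ h : lo - 1 < m.length, (m.get ⟨lo - 1, h⟩).1 ≤ p) →
      (hi = m.length ∨ ∃ h : hi < m.length, p < (m.get ⟨hi, h⟩).1) →
      (bsearch m p n lo hi ≤ m.length ∧
        (bsearch m p n lo hi = 0 ∨ ∃ h : bsearch m p n lo hi - 1 < m.length,
          (m.get ⟨bsearch m p n lo hi - 1, h⟩).1 ≤ p) ∧
        (bsearch m p n lo hi = m.length ∨ ∃ h : bsearch m p n lo hi < m.length,
          p < (m.get ⟨bsearch m p n lo hi, h⟩).1)) := by
  intro n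
  induction n with
  | zero =>
      intro lo hi hn hle hhi hinvlo hinvhi
      have heq : lo = hi := by clear hinvlo hinvhi; omega
      subst heq
      exact ⟨hhi, hinvlo, hinvhi⟩
  | succ n ih =>
      intro lo hi hn hle hhi hinvlo hinvhi
      by_cases hlt : lo < hi
      · rw [bsearch, if_pos hlt]
        have hmid : (lo + hi) / 2 < m.length := by clear hinvlo hinvhi; omega
        have ha1 : hi - ((lo + hi) / 2 + 1) ≤ n := by clear hinvlo hinvhi; omega
        have ha2 : (lo + hi) / 2 + 1 ≤ hi := by clear hinvlo hinvhi; omega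
        have ha3 : (lo + hi) / 2 - lo ≤ n := by clear hinvlo hinvhi; omega
        have ha4 : lo ≤ (lo + hi) / 2 := by clear hinvlo hinvhi; omega
        have ha5 : (lo + hi) / 2 ≤ m.length := by clear hinvlo hinvhi; omega
        have ha6 : (lo + hi) / 2 + 1 - 1 < m.length := by clear hinvlo hinvhi; omega
        by_cases hc : (m.getD ((lo + hi) / 2) (0, 0)).1 ≤ p
        · rw [if_pos hc]
          refine ih ((lo + hi) / 2 + 1) hi ha1 ha2 hhi ?_ hinvhi
          right
          refine ⟨ha6, ?_⟩
          simpa [List.getD_eq_getElem?_getD, List.getElem?_eq_getElem hmid] using hc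
        · rw [if_neg hc]
          refine ih lo ((lo + hi) / 2) ha3 ha4 ha5 hinvlo ?_
          right
          refine ⟨hmid, ?_⟩
          rw [not_le] at hc
          simpa [List.getD_eq_getElem?_getD, List.getElem?_eq_getElem hmid] using hc
      · rw [bsearch, if_neg hlt]
        have : lo = hi := by clear hinvlo hinvhi; omega
        subst this
        exact ⟨hhi, hinvlo, hinvhi⟩

-- per-product: B's test equals coverage by the merged list
theorem bsearch_covers (m : List (Int × Int)) (p : Int) (hpw : m.Pairwise sep) :
    ((bsearch m p m.length 0 m.length ≠ 0 ∧
      p ≤ (m.getD (bsearch m p m.length 0 m.length - 1) (0, 0)).2) ↔ covers p m) := by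
  obtain ⟨hle, hlo, hhi⟩ := bsearch_inv m p (m.length) 0 m.length (by omega) (by omega)
    (le_refl _) (Or.inl rfl) (Or.inl rfl)
  set i := bsearch m p m.length 0 m.length with hi_def
  -- from pairwise: starts noncdecreasing, ends before later starts
  have hsep : ∀ (j k : Nat) (hj : j < m.length) (hk : k < m.length), j < k →
      sep (m.get ⟨j, hj⟩) (m.get ⟨k, hk⟩) := by
    intro j k hj hk hjk
    exact List.pairwise_iff_get.mp hpw ⟨j, hj⟩ ⟨k, hk⟩ hjk
  constructor
  · rintro ⟨hne, hp2⟩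
    rcases hlo with h0 | ⟨h, hp1⟩
    · exact absurd h0 hne
    · refine ⟨m.get ⟨i - 1, h⟩, List.get_mem m _, hp1, ?_⟩
      simpa [List.getD_eq_getElem?_getD, List.getElem?_eq_getElem h] using hp2
  · rintro ⟨r, hr, h1, h2⟩
    obtain ⟨j, hj, rfl⟩ := List.mem_iff_get.mp hr
    obtain ⟨j, hjlt⟩ := j
    -- j < i: otherwise p < start_i ≤ start_j ≤ p
    have hji : j < i := by
      by_contra hge
      rw [not_lt] at hge
      rcases hhi with hieq | ⟨h, hpi⟩
      · omega
      · have hle' : (m.get ⟨i, h⟩).1 ≤ (m.get ⟨j, hjlt⟩).1 := by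
          rcases Nat.eq_or_lt_of_le hge with heq | hlt
          · subst heq; exact le_refl _
          · exact (hsep i j h hjlt hlt).2
        exact absurd h1 (not_le.mpr (lt_of_lt_of_le hpi hle'))
    have hne : i ≠ 0 := by omega
    rcases hlo with h0 | ⟨h, hp1⟩
    · exact absurd h0 hne
    refine ⟨hne, ?_⟩
    have hgoal : p ≤ (m.get ⟨i - 1, h⟩).2 := by
      rcases Nat.lt_or_ge j (i - 1) with hlt | hge
      · -- m[j].2 < m[i-1].1 ≤ p, contradicting p ≤ m[j].2
        have := (hsep j (i - 1) hjlt h hlt).1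
        omega
      · have : j = i - 1 := by omega
        subst this; exact h2
    simpa [List.getD_eq_getElem?_getD, List.getElem?_eq_getElem h] using hgoal

-- the two per-product indicators agree
theorem indicator_eq (ranges : List (Int × Int)) (p : Int) :
    part1Inner p ranges =
      (if bsearch (mergedOf ranges) p (mergedOf ranges).length 0 (mergedOf ranges).length ≠ 0 ∧
          p ≤ ((mergedOf ranges).getD (bsearch (mergedOf ranges) p (mergedOf ranges).length 0 (mergedOf ranges).length - 1) (0, 0)).2
        then 1 else 0) := by
  rw [part1Inner_eq]
  have h := bsearch_covers (mergedOf ranges) p (mergedOf_pairwise ranges)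
  have h2 := mergedOf_covers p ranges
  by_cases hc : covers p ranges
  · rw [if_pos hc, if_pos (h.mpr (h2.mpr hc))]
  · rw [if_neg hc, if_neg (fun hx => hc (h2.mp (h.mp hx)))]

theorem foldl_eq (ranges : List (Int × Int)) (products : List Int) :
    ∀ acc : Int,
      products.foldl (fun out p => out + part1Inner p ranges) acc =
      products.foldl (fun out p =>
        let m := mergedOf ranges
        let i := bsearch m p m.length 0 m.length
        if i ≠ 0 ∧ p ≤ (m.getD (i - 1) (0, 0)).2 then out + 1 else out) acc := by
  induction products with
  | nil => intro acc; rfl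
  | cons p rest ih =>
      intro acc
      simp only [List.foldl_cons]
      rw [indicator_eq ranges p]
      by_cases hc : bsearch (mergedOf ranges) p (mergedOf ranges).length 0 (mergedOf ranges).length ≠ 0 ∧
          p ≤ ((mergedOf ranges).getD (bsearch (mergedOf ranges) p (mergedOf ranges).length 0 (mergedOf ranges).length - 1) (0, 0)).2
      · rw [if_pos hc]; simp only [if_pos hc]; exact ih (acc + 1)
      · rw [if_neg hc]; simp only [if_neg hc, add_zero]; exact ih acc

-- ===== VERDICT (by name: the statement is the Claim_ definition above) =====
theorem part1_spec : Claim_equal_part1 := by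
  intro ranges products _
  unfold Spec_part1 part1 part1_alt
  exact foldl_eq ranges products 0
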